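-- pv_equiv track=rewrite | github.com/PoliUniLu/cora | cora/essential.py | _create_onset_groups
-- ===== SOURCE A (Python) =====
-- def _create_onset_groups(onset):
--     max_len = len(onset[0])+1
--     groups = list()
--     for i in range(0,max_len):
--         groups.append([])
--     for x in onset:
--         groups[sum(1 for elm in x if elm!=0)].append(x)
--     return groups
-- ===== SOURCE B (Python) =====
-- def _create_onset_groups(onset):
--     max_len = len(onset[0]) + 1
--     counted = [(sum(1 for elm in x if elm != 0), x) for x in onset]
--     return [[x for c, x in counted if c == k] for k in range(max_len)]
-- ===== Notes on version B (the rewrite author's own statement) =====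
-- stated objective: alternative
-- what changed: Instead of allocating max_len buckets and appending each row at its nonzero-count index, B pairs each row with its nonzero count once and then builds the result as a comprehension that, for each count k in range(max_len), filters the rows whose precomputed count equals k.
import Mathlib
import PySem

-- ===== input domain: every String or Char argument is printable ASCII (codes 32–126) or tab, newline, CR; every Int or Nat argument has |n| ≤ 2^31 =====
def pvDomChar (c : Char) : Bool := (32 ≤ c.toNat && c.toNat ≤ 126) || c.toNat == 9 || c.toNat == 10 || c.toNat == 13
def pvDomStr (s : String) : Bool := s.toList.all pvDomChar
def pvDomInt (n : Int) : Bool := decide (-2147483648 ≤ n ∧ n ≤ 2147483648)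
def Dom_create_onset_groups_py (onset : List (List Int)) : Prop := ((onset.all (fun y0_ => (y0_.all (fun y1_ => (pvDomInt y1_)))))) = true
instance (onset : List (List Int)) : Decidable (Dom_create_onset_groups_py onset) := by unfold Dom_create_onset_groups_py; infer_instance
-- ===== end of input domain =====

-- B replaces A's bucket-allocation-and-indexed-append with a count-then-filter-per-k comprehension (alternative decomposition, same results, same cost).
-- Pre_ excludes exactly the inputs on which A raises: empty onset (IndexError on onset[0]) and rows whose
-- nonzero count exceeds len(onset[0]) (IndexError on groups[...]).


-- sum(1 for elm in x if elm != 0): the literal generator-sum both Pythons contain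
def pyNZ (x : List Int) : Nat := x.foldl (fun a elm => if elm ≠ 0 then a + 1 else a) 0

-- ===== PORT A =====
-- A: build max_len empty buckets, then append each row at index pyNZ x.
-- (onset[0] on empty onset raises in Python; that input is outside Pre_, headD [] is used only to stay total.)
def create_onset_groups_py (onset : List (List Int)) : List (List (List Int)) :=
  let max_len := (onset.headD []).length + 1
  let groups := (List.range max_len).foldl (fun gs _ => gs ++ [[]]) []
  onset.foldl (fun gs x => gs.set (pyNZ x) (gs.getD (pyNZ x) [] ++ [x])) groups

-- ===== PORT B =====
-- B: pair each row with its nonzero count once, then for each k in range(max_len)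
-- collect the rows whose precomputed count is k.
def create_onset_groups_py_alt (onset : List (List Int)) : List (List (List Int)) :=
  let max_len := (onset.headD []).length + 1
  let counted := onset.map (fun x => (pyNZ x, x))
  (List.range max_len).map (fun k => (counted.filter (fun cx => cx.1 == k)).map (fun cx => cx.2))

-- ===== PRECONDITION & SPEC =====
-- Excludes exactly the inputs on which the Python A raises IndexError: empty onset, and rows with more
-- nonzero entries than len(onset[0]).
def Pre_create_onset_groups_py (onset : List (List Int)) : Prop :=
  onset ≠ [] ∧ ∀ x ∈ onset, pyNZ x ≤ (onset.headD []).length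
instance (onset : List (List Int)) : Decidable (Pre_create_onset_groups_py onset) := by unfold Pre_create_onset_groups_py; infer_instance
def pvWitness_create_onset_groups_py : List (List Int) := [[1, 0], [0, 0], [1, 1]]

def Spec_create_onset_groups_py (onset : List (List Int)) (out : List (List (List Int))) : Prop := out = create_onset_groups_py_alt onset
instance (onset : List (List Int)) (out : List (List (List Int))) : Decidable (Spec_create_onset_groups_py onset out) := by unfold Spec_create_onset_groups_py; infer_instance

-- ===== CLAIM (what is proved, stated in full; the proofs are below) =====
def Claim_equal_create_onset_groups_py : Prop := ∀ (onset : List (List Int)), Dom_create_onset_groups_py onset → Pre_create_onset_groups_py onset → Spec_create_onset_groups_py onset (create_onset_groups_py onset)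

-- ===== LEMMAS AND PROOFS =====

-- A's bucket-building loop produces n empty buckets.
lemma buildGroups_eq (n : Nat) :
    (List.range n).foldl (fun (gs : List (List (List Int))) _ => gs ++ [[]]) [] = List.replicate n [] := by
  induction n with
  | zero => simp
  | succ m ih =>
      simp [List.range_succ, ih, List.replicate_succ']

-- Loop invariant: folding bucket-appends from any gs of length n equals, at each index k < n,
-- gs[k] followed by the rows of l with count k.
lemma fold_set_eq (f : List Int → Nat) (n : Nat) (l : List (List Int)) :
    ∀ gs : List (List (List Int)), gs.length = n → (∀ x ∈ l, f x < n) →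
      l.foldl (fun gs x => gs.set (f x) (gs.getD (f x) [] ++ [x])) gs
        = (List.range n).map (fun k => gs.getD k [] ++ l.filter (fun x => f x == k)) := by
  induction l with
  | nil =>
      intro gs hlen _
      apply List.ext_getElem
      · simp [hlen]
      · intro i h1 h2
        simp at h2
        simp [List.getD, hlen, h2]
  | cons x t ih =>
      intro gs hlen hb
      have hx : f x < n := hb x (by simp)
      have hx' : f x < gs.length := by omega
      have := ih (gs.set (f x) (gs.getD (f x) [] ++ [x])) (by simp [hlen]) (fun y hy => hb y (by simp [hy]))
      simp only [List.foldl_cons, this]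
      apply List.map_congr_left
      intro k hk
      by_cases hkf : k = f x
      · subst hkf
        simp [List.getD, List.getElem?_set_self hx', List.getElem?_eq_getElem hx']
      · have hget : ((gs.set (f x) (gs.getD (f x) [] ++ [x])).getD k []) = gs.getD k [] := by
          simp [List.getD, List.getElem?_set_ne (by omega : f x ≠ k)]
        have hfilt : (x :: t).filter (fun y => f y == k) = t.filter (fun y => f y == k) := by
          simp [Ne.symm hkf]
        rw [hget, hfilt]

-- B's pair-then-filter at count k selects exactly the rows with pyNZ x = k.
lemma counted_filter_eq (l : List (List Int)) (k : Nat) :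
    ((l.map (fun x => (pyNZ x, x))).filter (fun cx => cx.1 == k)).map (fun cx => cx.2)
      = l.filter (fun x => pyNZ x == k) := by
  induction l with
  | nil => rfl
  | cons x t ih =>
      by_cases h : pyNZ x = k <;> simp [List.filter_cons, h, ih]

-- ===== VERDICT (by name: the statement is the Claim_ definition above) =====
theorem create_onset_groups_py_spec : Claim_equal_create_onset_groups_py := by
  intro onset _ hpre
  obtain ⟨hne, hb⟩ := hpre
  unfold Spec_create_onset_groups_py create_onset_groups_py create_onset_groups_py_alt
  simp only [buildGroups_eq, counted_filter_eq]
  rw [fold_set_eq (f := pyNZ) (n := (onset.headD []).length + 1) onset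
      (List.replicate _ []) (by simp) (fun x hx => Nat.lt_succ_of_le (hb x hx))]
  apply List.map_congr_left
  intro k hk
  have hk' : k < (onset.headD []).length + 1 := List.mem_range.mp hk
  simp [List.getD, List.getElem?_replicate]
  split <;> rfl
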